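-- pv_equiv track=rewrite | github.com/apclemens/calling-tools | generate_pages.py | replace_stars
-- ===== SOURCE A (Python) =====
-- def replace_stars(text):
--     lines = text.split('\n')
--     new_lines = []
--     for line in lines:
--         if '******' in line:
--             new_lines.append('<p style={{textAlign: "center"}}><span style="font-weight: 400;">*************************************</span></p>')
--         else:
--             new_lines.append(line)
--     return '\n'.join(new_lines)
-- ===== SOURCE B (Python) =====
-- REPL = '<p style={{textAlign: "center"}}><span style="font-weight: 400;">*************************************</span></p>'
--
-- def replace_stars(text):
--     # one pass over the characters: split lines by hand and detect a run of
--     # six stars with a counter instead of a substring search per line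
--     out = []
--     buf = []
--     run = 0
--     has6 = False
--     for ch in text:
--         if ch == '\n':
--             out.append(REPL if has6 else ''.join(buf))
--             buf = []
--             run = 0
--             has6 = False
--         else:
--             buf.append(ch)
--             if ch == '*':
--                 run += 1
--             else:
--                 run = 0
--             has6 = has6 or run >= 6
--     out.append(REPL if has6 else ''.join(buf))
--     return '\n'.join(out)
-- ===== Notes on version B (the rewrite author's own statement) =====
-- stated objective: alternative
-- what changed: Replaces the line-split, the per-line six-star substring test and the join with a single character-level pass that splits lines by hand and detects a run of six stars with a counter.
import Mathlib
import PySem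

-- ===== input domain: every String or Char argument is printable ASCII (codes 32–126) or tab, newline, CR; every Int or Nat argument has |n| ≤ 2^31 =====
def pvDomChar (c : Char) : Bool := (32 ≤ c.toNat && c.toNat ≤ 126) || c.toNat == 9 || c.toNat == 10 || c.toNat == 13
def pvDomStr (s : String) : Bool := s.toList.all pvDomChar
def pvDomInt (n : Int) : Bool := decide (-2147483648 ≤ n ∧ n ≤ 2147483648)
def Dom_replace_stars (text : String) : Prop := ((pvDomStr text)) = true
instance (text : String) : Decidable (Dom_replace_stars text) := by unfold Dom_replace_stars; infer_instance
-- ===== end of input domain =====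

-- B replaces A's split('\n') / per-line '******' substring test / join with a single
-- character-level pass that splits lines by hand and uses a star-run counter
-- (objective: alternative, same return value).

def pvRepl : List Char :=
  "<p style={{textAlign: \"center\"}}><span style=\"font-weight: 400;\">*************************************</span></p>".toList

-- ===== PORT A =====
def replace_stars (text : String) : String :=
  let lines := PySem.Chars.splitOn text.toList ['\n']
  let newLines := lines.foldl
    (fun acc line => acc ++ [if PySem.Chars.isIn "******".toList line then pvRepl else line]) []
  String.ofList (PySem.Chars.join ['\n'] newLines)

-- ===== PORT B =====
def pvBLoop (cs : List Char) (buf : List Char) (run : Nat) (has6 : Bool)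
    (out : List (List Char)) : List (List Char) :=
  match cs with
  | [] => out ++ [if has6 then pvRepl else buf]
  | c :: rest =>
    if c = '\n' then
      pvBLoop rest [] 0 false (out ++ [if has6 then pvRepl else buf])
    else
      let run' := if c = '*' then run + 1 else 0
      pvBLoop rest (buf ++ [c]) run' (has6 || decide (6 ≤ run')) out

def replace_stars_alt (text : String) : String :=
  String.ofList (PySem.Chars.join ['\n'] (pvBLoop text.toList [] 0 false []))

-- ===== PRECONDITION & SPEC =====
def Spec_replace_stars (text : String) (out : String) : Prop := out = replace_stars_alt text
instance (text : String) (out : String) : Decidable (Spec_replace_stars text out) := by unfold Spec_replace_stars; infer_instance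

-- ===== CLAIM (what is proved, stated in full; the proofs are below) =====
def Claim_equal_replace_stars : Prop := ∀ (text : String), Dom_replace_stars text → Spec_replace_stars text (replace_stars text)

-- ===== LEMMAS AND PROOFS =====

-- the obvious structural split on '\n', common reference point of both ports
def pvSplitNl : List Char → List Char → List (List Char)
  | buf, [] => [buf]
  | buf, c :: rest => if c = '\n' then buf :: pvSplitNl [] rest else pvSplitNl (buf ++ [c]) rest

lemma pvGo_eq (fuel : Nat) :
    ∀ (l cur : List Char) (accs : List (List Char)),
      l.length < fuel →
      PySem.Chars.splitOn.go ['\n'] fuel l cur accs = accs.reverse ++ pvSplitNl cur.reverse l := by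
  induction fuel with
  | zero => intro l cur accs h; omega
  | succ n ih =>
    intro l cur accs h
    cases l with
    | nil => simp [PySem.Chars.splitOn.go, pvSplitNl]
    | cons c rest =>
      by_cases hc : c = '\n'
      · subst hc
        simp only [PySem.Chars.splitOn.go, List.isPrefixOf, BEq.rfl, Bool.true_and, if_pos]
        rw [show List.drop ['\n'].length ('\n' :: rest) = rest from rfl,
          ih rest [] (cur.reverse :: accs) (by simpa using Nat.lt_of_succ_lt_succ h)]
        simp [pvSplitNl]
      · simp only [PySem.Chars.splitOn.go]
        rw [if_neg (by simp [List.isPrefixOf]; exact fun hh => hc hh.symm)]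
        rw [ih rest (c :: cur) accs (by simpa using Nat.lt_of_succ_lt_succ h)]
        simp [pvSplitNl, hc]

lemma pvSplitOn_eq (s : List Char) :
    PySem.Chars.splitOn s ['\n'] = pvSplitNl [] s := by
  rw [PySem.Chars.splitOn, pvGo_eq (s.length + 1) s [] [] (Nat.lt_succ_self _)]
  rfl

def pvTrail (l : List Char) : Nat := (l.reverse.takeWhile (· == '*')).length

lemma pvRepl_prefix (l : List Char) (k : Nat) :
    List.replicate k '*' <+: l ↔ k ≤ (l.takeWhile (· == '*')).length := by
  induction l generalizing k with
  | nil => cases k <;> simp [List.replicate_succ]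
  | cons x xs ih =>
    cases k with
    | zero => simp
    | succ m =>
      by_cases hx : x = '*'
      · subst hx
        simp [List.replicate_succ, List.cons_prefix_cons, ih]
      · simp [List.replicate_succ, List.cons_prefix_cons, hx, Ne.symm hx]

lemma pvTrail_snoc (buf : List Char) (c : Char) :
    pvTrail (buf ++ [c]) = if c = '*' then pvTrail buf + 1 else 0 := by
  by_cases hc : c = '*' <;>
    simp [pvTrail, List.reverse_append, hc]

lemma pvIsIn_snoc (buf : List Char) (c : Char) :
    PySem.Chars.isIn "******".toList (buf ++ [c]) =
      (PySem.Chars.isIn "******".toList buf || (decide (c = '*') && decide (5 ≤ pvTrail buf))) := by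
  have hstars : "******".toList = List.replicate 6 '*' := by decide
  rcases Bool.eq_false_or_eq_true (PySem.Chars.isIn "******".toList (buf ++ [c])) with h | h <;>
    rw [h]
  · rw [eq_comm]
    rw [PySem.Chars.isIn_iff_infix] at h
    rw [← List.reverse_infix, hstars] at h
    simp only [List.reverse_append, List.reverse_singleton, List.singleton_append,
      List.reverse_replicate] at h
    rw [List.infix_cons_iff] at h
    rcases h with h | h
    · rw [show (6 : Nat) = 5 + 1 from rfl, List.replicate_succ, List.cons_prefix_cons] at h
      obtain ⟨hc, hp⟩ := h
      have : (5 : Nat) ≤ pvTrail buf := (pvRepl_prefix _ _).mp hp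
      simp [hc.symm, this]
    · rw [show List.replicate 6 '*' = (List.replicate 6 '*').reverse from by decide] at h
      rw [List.reverse_infix, ← hstars, ← PySem.Chars.isIn_iff_infix] at h
      rw [h, Bool.true_or]
  · rw [eq_comm]
    rw [PySem.Chars.isIn_eq_false_iff] at h
    simp only [Bool.or_eq_false_iff, Bool.and_eq_false_iff]
    constructor
    · rw [PySem.Chars.isIn_eq_false_iff]
      exact fun hin => h (hin.trans (List.prefix_append buf [c]).isInfix)
    · by_contra hcon
      simp only [not_or, Bool.not_eq_false, decide_eq_true_eq] at hcon
      obtain ⟨hc, htr⟩ := hcon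
      apply h
      rw [← List.reverse_infix, hstars]
      simp only [List.reverse_append, List.reverse_replicate, List.reverse_singleton,
        List.singleton_append]
      apply List.IsPrefix.isInfix
      rw [show (6 : Nat) = 5 + 1 from rfl, List.replicate_succ, hc]
      exact List.cons_prefix_cons.mpr ⟨rfl, (pvRepl_prefix _ _).mpr htr⟩

lemma pvBLoop_eq (cs : List Char) :
    ∀ (buf : List Char) (run : Nat) (has6 : Bool) (out : List (List Char)),
      run = pvTrail buf → has6 = PySem.Chars.isIn "******".toList buf →
      pvBLoop cs buf run has6 out =
        out ++ (pvSplitNl buf cs).map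
          (fun l => if PySem.Chars.isIn "******".toList l then pvRepl else l) := by
  induction cs with
  | nil => intro buf run has6 out h1 h2; simp [pvBLoop, pvSplitNl, h2]
  | cons c rest ih =>
    intro buf run has6 out h1 h2
    by_cases hc : c = '\n'
    · subst hc
      rw [show pvBLoop ('\n' :: rest) buf run has6 out
          = pvBLoop rest [] 0 false (out ++ [if has6 then pvRepl else buf]) from by
        simp [pvBLoop]]
      rw [ih [] 0 false _ rfl rfl]
      simp [pvSplitNl, h2]
    · rw [show pvBLoop (c :: rest) buf run has6 out
          = pvBLoop rest (buf ++ [c]) (if c = '*' then run + 1 else 0)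
              (has6 || decide (6 ≤ if c = '*' then run + 1 else 0)) out from by
        simp [pvBLoop, hc]]
      rw [ih (buf ++ [c]) _ _ out
        (by rw [pvTrail_snoc, h1])
        (by rw [pvIsIn_snoc, h2, h1]
            by_cases hs : c = '*'
            · simp [hs]
            · simp [hs])]
      simp [pvSplitNl, hc]

-- ===== VERDICT (by name: the statement is the Claim_ definition above) =====
theorem replace_stars_spec : Claim_equal_replace_stars := by
  intro text _
  unfold Spec_replace_stars replace_stars replace_stars_alt
  simp only [pvSplitOn_eq, PySem.List.foldl_append_singleton_eq_map,
    pvBLoop_eq text.toList [] 0 false [] rfl rfl, List.nil_append]
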